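-- pv_equiv track=rewrite | github.com/JasmineZhangxyz/data-structs-and-algos | random-contraction/RandomContraction.py | delete_self_loops
-- ===== SOURCE A (Python) =====
-- def delete_self_loops(a):
--     element = a[0]
--     j = 0
--     for i in range(1, len(a)):
--         if a[i] == element:
--             a[i] = 0
--             j += 1
--     for k in range(0, j):
--         a.remove(0)
--     return a
-- ===== SOURCE B (Python) =====
-- def delete_self_loops(a):
--     # Drop every tail entry equal to the first element, in one pass.
--     e = a[0]
--     a[1:] = [x for x in a[1:] if x != e]
--     return a
-- ===== Notes on version B (the rewrite author's own statement) =====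
-- stated objective: simpler
-- what changed: A marks matching tail entries with a 0 sentinel and then calls list.remove(0) once per match (each a fresh scan); B simply filters the tail in one comprehension, with no sentinel and no removal passes.
-- intended difference: On lists where a literal 0 collides with A's 0 sentinel (a nonzero entry before a 0 in the tail when the head is 0, or a 0 followed by some other value followed by a match when the head is nonzero), A's remove(0) deletes a genuine 0 entry (or the head) and leaves a marked 0 behind; B returns the head followed by the non-matching tail entries in their original order, which is the intended deletion of self-loops. — e.g. on delete_self_loops([1, 0, 2, 1]): A returns [1, 2, 0], B returns [1, 0, 2]
import Mathlib
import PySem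

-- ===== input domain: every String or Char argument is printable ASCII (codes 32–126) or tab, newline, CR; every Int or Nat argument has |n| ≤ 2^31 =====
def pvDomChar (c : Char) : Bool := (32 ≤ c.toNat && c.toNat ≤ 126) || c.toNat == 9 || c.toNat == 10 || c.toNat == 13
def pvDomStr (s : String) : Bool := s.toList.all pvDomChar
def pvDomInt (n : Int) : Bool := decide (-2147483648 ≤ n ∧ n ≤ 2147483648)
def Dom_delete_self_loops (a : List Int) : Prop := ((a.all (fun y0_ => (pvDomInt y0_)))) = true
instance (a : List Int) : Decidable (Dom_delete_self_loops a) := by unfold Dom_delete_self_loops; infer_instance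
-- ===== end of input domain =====

-- B filters the tail in one pass instead of A's 0-sentinel marking plus repeated
-- list.remove(0); where A's sentinel collides with genuine 0 entries (D_ below),
-- B keeps the intended entries. Both Pythons mutate the argument in place and
-- return it; the equivalence proved here is about the RETURN value.

-- ===== PORT A =====
-- a.remove(0): removes the first 0; the none branch (ValueError) is unreachable
-- here since the loop runs only j times and at least j zeros were just written.
def dslRemove0 (l : List Int) : List Int :=
  match PySem.List.remove? l 0 with
  | some l' => l'
  | none => l

def delete_self_loops (a : List Int) : List Int :=
  match PySem.List.pyGet? a 0 with
  | none => []   -- a[0] raises IndexError on []; excluded by Pre_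
  | some element =>
    let s := (PySem.List.pyRange 1 (a.length) 1).foldl
      (fun (s : List Int × Int) i =>
        if PySem.List.pyGetD s.1 i 0 = element then (PySem.List.pySetD s.1 i 0, s.2 + 1) else s)
      (a, 0)
    (PySem.List.pyRange 0 s.2 1).foldl (fun l _ => dslRemove0 l) s.1

-- ===== PORT B =====
def delete_self_loops_alt (a : List Int) : List Int :=
  match a with
  | [] => []   -- a[0] raises IndexError on []; excluded by Pre_
  | e :: t => e :: t.filter (fun x => x != e)

-- ===== PRECONDITION & SPEC =====
-- A (and B) raise IndexError on the empty list; nothing else is excluded.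
def Pre_delete_self_loops (a : List Int) : Prop := a ≠ []
instance (a : List Int) : Decidable (Pre_delete_self_loops a) := by
  unfold Pre_delete_self_loops; infer_instance

def pvWitness_delete_self_loops : List Int := [1, 2, 1]

-- On lists where a literal 0 collides with A's 0 sentinel (a nonzero entry before a 0
-- in the tail when a[0]=0, or a 0 then some other value then a match when a[0]≠0),
-- A's remove(0) deletes a genuine 0 entry (or the head) and leaves a marked 0
-- behind; B returns the head followed by the non-matching tail entries in their
-- original order, the intended deletion of self-loops.
def D_delete_self_loops (a : List Int) : Prop :=
  a ≠ [] ∧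
  (if a.headI = 0 then
    (0 : Int) ∈ (a.drop 1).dropWhile (fun x => x == 0)
  else
    a.headI ∈ ((a.drop 1).dropWhile (fun x => x != 0)).dropWhile
      (fun x => x == 0 || x == a.headI))
instance (a : List Int) : Decidable (D_delete_self_loops a) := by
  unfold D_delete_self_loops; infer_instance

def Spec_delete_self_loops (a : List Int) (out : List Int) : Prop :=
  ¬ D_delete_self_loops a → out = delete_self_loops_alt a
instance (a : List Int) (out : List Int) : Decidable (Spec_delete_self_loops a out) := by
  unfold Spec_delete_self_loops; infer_instance

def pvDiffWitness_delete_self_loops : List Int := [1, 0, 2, 1]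
def pvDiffWitnessOut_delete_self_loops : (List Int) × (List Int) := ([1, 2, 0], [1, 0, 2])

-- ===== CLAIM (what is proved, stated in full; the proofs are below) =====
def Claim_unchanged_delete_self_loops : Prop :=
  ∀ (a : List Int), Dom_delete_self_loops a → Pre_delete_self_loops a →
    Spec_delete_self_loops a (delete_self_loops a)
def Claim_changed_delete_self_loops : Prop :=
  Dom_delete_self_loops (pvDiffWitness_delete_self_loops) ∧
  Pre_delete_self_loops (pvDiffWitness_delete_self_loops) ∧
  D_delete_self_loops (pvDiffWitness_delete_self_loops) ∧
  delete_self_loops (pvDiffWitness_delete_self_loops) = pvDiffWitnessOut_delete_self_loops.1 ∧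
  delete_self_loops_alt (pvDiffWitness_delete_self_loops) = pvDiffWitnessOut_delete_self_loops.2 ∧
  pvDiffWitnessOut_delete_self_loops.1 ≠ pvDiffWitnessOut_delete_self_loops.2
def Claim_exact_delete_self_loops : Prop :=
  ∀ (a : List Int), Dom_delete_self_loops a → Pre_delete_self_loops a →
    D_delete_self_loops a → delete_self_loops a ≠ delete_self_loops_alt a

-- ===== LEMMAS AND PROOFS =====

-- the marking function of A's first loop
def dslF (e v : Int) : Int := if v = e then 0 else v

-- reference "skip the first n zeros" function
def dslBuildN : Nat → List Int → List Int
  | _, [] => []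
  | n, x :: xs => if x = 0 ∧ n ≠ 0 then dslBuildN (n - 1) xs else x :: dslBuildN n xs

theorem dslBuildN_zero (l : List Int) : dslBuildN 0 l = l := by
  induction l with
  | nil => rfl
  | cons x xs ih => simp [dslBuildN, ih]

theorem dslRemove0_cons_ne (x : Int) (l : List Int) (hx : x ≠ 0) :
    dslRemove0 (x :: l) = x :: dslRemove0 l := by
  unfold dslRemove0
  rw [PySem.List.remove?_cons_of_ne l hx]
  cases PySem.List.remove? l 0 <;> simp

theorem dslIter_cons_ne (n : Nat) (x : Int) (l : List Int) (hx : x ≠ 0) :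
    dslRemove0^[n] (x :: l) = x :: dslRemove0^[n] l := by
  induction n generalizing l with
  | zero => simp
  | succ n ih =>
      rw [Function.iterate_succ_apply, Function.iterate_succ_apply,
        dslRemove0_cons_ne x l hx, ih]

theorem dslIter_eq_buildN (l : List Int) (n : Nat) (h : n ≤ l.count 0) :
    dslRemove0^[n] l = dslBuildN n l := by
  induction l generalizing n with
  | nil =>
      have hn0 : n = 0 := by simpa using h
      subst hn0
      simp [dslBuildN]
  | cons x xs ih =>
      by_cases hx : x = 0
      · subst hx
        cases n with
        | zero => simp [dslBuildN_zero]
        | succ n =>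
            rw [Function.iterate_succ_apply]
            have hstep : dslRemove0 (0 :: xs) = xs := by
              simp [dslRemove0]
            rw [hstep]
            have hn : n ≤ xs.count 0 := by
              simp at h; omega
            rw [ih n hn]
            simp [dslBuildN]
      · have hcnt : n ≤ xs.count 0 := by
          simpa [List.count_cons, hx] using h
        rw [dslIter_cons_ne n x xs hx, ih n hcnt]
        simp [dslBuildN, hx]

-- a fold over a list that ignores its elements is an iterate
theorem dslFoldl_const {α β : Type} (L : List β) (f : α → α) (init : α) :
    L.foldl (fun acc _ => f acc) init = f^[L.length] init := by
  induction L generalizing init with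
  | nil => rfl
  | cons x xs ih => simp [List.foldl_cons, ih, Function.iterate_succ_apply]

-- phase 1 of A: marking pass with offset invariant
theorem dslMark (e : Int) (v : List Int) : ∀ (u : List Int) (j : Int),
    (PySem.List.pyRange (1 + u.length) (1 + u.length + v.length) 1).foldl
      (fun (s : List Int × Int) i =>
        if PySem.List.pyGetD s.1 i 0 = e then (PySem.List.pySetD s.1 i 0, s.2 + 1) else s)
      (e :: (u ++ v), j)
    = (e :: (u ++ v.map (dslF e)), j + v.count e) := by
  induction v with
  | nil =>
      intro u j
      rw [PySem.List.pyRange_one_eq_nil (by simp)]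
      simp
  | cons x xs ih =>
      intro u j
      rw [PySem.List.pyRange_one_cons (by push_cast [List.length_cons]; omega)]
      rw [List.foldl_cons]
      have hidx : (1 : Int) + (u.length : Int) = ((u.length + 1 : Nat) : Int) := by push_cast; omega
      have hget : PySem.List.pyGetD (e :: (u ++ x :: xs)) (1 + (u.length : Int)) 0 = x := by
        rw [hidx, PySem.List.pyGetD_natCast]
        have : (e :: (u ++ x :: xs)).getD (u.length + 1) 0 = x := by
          simp [List.getD]
        exact this
      have hset : PySem.List.pySetD (e :: (u ++ x :: xs)) (1 + (u.length : Int)) 0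
          = e :: (u ++ 0 :: xs) := by
        rw [hidx, PySem.List.pySetD_natCast]
        simp [List.set_cons_succ, List.set_append_right]
      by_cases hx : x = e
      · rw [if_pos (by rw [hget]; exact hx), hset]
        have hre : e :: (u ++ 0 :: xs) = e :: ((u ++ [(0 : Int)]) ++ xs) := by simp
        have hlen : (1 : Int) + (u.length : Int) + 1 = 1 + ((u ++ [(0:Int)]).length : Int) := by
          simp; omega
        have hlen2 : (1 : Int) + (u.length : Int) + ((x :: xs).length : Int)
            = 1 + ((u ++ [(0:Int)]).length : Int) + (xs.length : Int) := by
          simp; ring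
        rw [hre, hlen2, hlen, ih (u ++ [(0 : Int)]) (j + 1)]
        simp [dslF, hx]
        omega
      · rw [if_neg (by rw [hget]; exact hx)]
        have hre : e :: (u ++ x :: xs) = e :: ((u ++ [x]) ++ xs) := by simp
        have hlen : (1 : Int) + (u.length : Int) + 1 = 1 + ((u ++ [x]).length : Int) := by
          simp; omega
        have hlen2 : (1 : Int) + (u.length : Int) + ((x :: xs).length : Int)
            = 1 + ((u ++ [x]).length : Int) + (xs.length : Int) := by
          simp; ring
        rw [hre, hlen2, hlen, ih (u ++ [x]) j]
        simp [dslF, hx]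

theorem dslCountZeroMap (e : Int) (t : List Int) :
    t.count e ≤ (t.map (dslF e)).count 0 := by
  induction t with
  | nil => simp
  | cons v vs ih =>
      by_cases hv : v = e <;> by_cases hz : dslF e v = 0 <;>
        simp_all [dslF, List.count_cons] <;> try omega

theorem dslMapF_id (e : Int) (t : List Int) (h : e ∉ t) : t.map (dslF e) = t := by
  induction t with
  | nil => rfl
  | cons v vs ih =>
      simp only [List.mem_cons, not_or] at h
      simp [dslF, Ne.symm, h.1, ih h.2]

theorem dslMapF_zeros (e : Int) (p : List Int) (h : ∀ x ∈ p, x = 0 ∨ x = e) :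
    p.map (dslF e) = List.replicate p.length 0 := by
  induction p with
  | nil => rfl
  | cons v vs ih =>
      have hv := h v (by simp)
      have hvs : ∀ x ∈ vs, x = 0 ∨ x = e := fun x hx => h x (by simp [hx])
      rcases hv with hv | hv <;> subst hv <;>
        simp [dslF, List.replicate_succ, ih hvs]

theorem dslFilter_zeros (e : Int) (he : e ≠ 0) (p : List Int) (h : ∀ x ∈ p, x = 0 ∨ x = e) :
    p.filter (fun x => x != e) = List.replicate (p.count 0) 0 := by
  induction p with
  | nil => rfl
  | cons v vs ih =>
      have hv := h v (by simp)
      have hvs : ∀ x ∈ vs, x = 0 ∨ x = e := fun x hx => h x (by simp [hx])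
      rcases hv with hv | hv <;> subst hv <;>
        simp [List.count_cons, Ne.symm he, he, List.replicate_succ, ih hvs]

-- removing n ≤ m zeros from replicate m 0 ++ s removes leading zeros only
theorem dslBuildN_replicate (n m : Nat) (s : List Int) (h : n ≤ m) :
    dslBuildN n (List.replicate m 0 ++ s) = List.replicate (m - n) 0 ++ s := by
  induction m generalizing n with
  | zero =>
      have : n = 0 := by omega
      subst this
      simp [dslBuildN_zero]
  | succ m ih =>
      cases n with
      | zero => simp [dslBuildN_zero]
      | succ n =>
          rw [List.replicate_succ, List.cons_append]
          show dslBuildN (n+1) (0 :: (List.replicate m 0 ++ s)) = _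
          rw [dslBuildN]
          rw [if_pos ⟨rfl, by omega⟩]
          simp only [Nat.add_sub_cancel]
          rw [ih n (by omega)]
          congr 2
          omega

-- count of e in p ++ s with e ∉ s
theorem dslCount_append_notmem (e : Int) (p s : List Int) (h : e ∉ s) :
    (p ++ s).count e = p.count e := by
  rw [List.count_append, List.count_eq_zero.mpr h]
  omega

theorem dslCount0_of_mem (e : Int) (he : e ≠ 0) (p : List Int)
    (h : ∀ x ∈ p, x = 0 ∨ x = e) : p.count 0 = p.length - p.count e := by
  induction p with
  | nil => simp
  | cons x xs ih =>
      have hx := h x (by simp)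
      have hxs : ∀ y ∈ xs, y = 0 ∨ y = e := fun y hy => h y (by simp [hy])
      have hle : xs.count e ≤ xs.length := List.count_le_length
      rcases hx with hx | hx <;> subst hx <;>
        simp_all [List.count_cons, Ne.symm he] <;> omega

-- core of the e ≠ 0 case: under ¬D_, the skip-j-zeros result is the filter
theorem dslBuild_eq_filter (e : Int) (he : e ≠ 0) (t : List Int)
    (hnd : e ∉ (t.dropWhile (fun x => x != 0)).dropWhile (fun x => x == 0 || x == e)) :
    dslBuildN (t.count e) (t.map (dslF e)) = t.filter (fun x => x != e) := by
  induction t with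
  | nil => rfl
  | cons v vs ih =>
      by_cases hv0 : v = 0
      · -- head is a literal zero: the tail splits as p ++ s, p ⊆ {0,e}, e ∉ s
        subst hv0
        rw [List.dropWhile_cons] at hnd
        simp only [bne_self_eq_false, Bool.false_eq_true, if_false] at hnd
        rw [List.dropWhile_cons] at hnd
        simp only [BEq.rfl, Bool.true_or, if_true] at hnd
        -- decompose vs
        have hsplit := List.takeWhile_append_dropWhile
          (p := fun x => x == 0 || x == e) (l := vs)
        set p := vs.takeWhile (fun x => x == 0 || x == e) with hp
        set s := vs.dropWhile (fun x => x == 0 || x == e) with hs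
        have hpmem : ∀ x ∈ p, x = 0 ∨ x = e := by
          intro x hx
          have := List.mem_takeWhile_imp hx
          simpa using this
        have hes : e ∉ s := hnd
        have hcnt : (0 :: vs).count e = vs.count e := by
          simp [List.count_cons, Ne.symm he]
        have hcnt2 : vs.count e = p.count e := by
          conv_lhs => rw [← hsplit]
          exact dslCount_append_notmem e p s hes
        have hmap : (0 :: vs).map (dslF e) =
            List.replicate (p.length + 1) 0 ++ s.map (dslF e) := by
          conv_lhs => rw [← hsplit]
          simp [dslF, Ne.symm he, dslMapF_zeros e p hpmem, List.replicate_succ]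
        by_cases hj : vs.count e = 0
        · -- no match at all: everything is kept on both sides
          have hevs : e ∉ vs := by
            rwa [List.count_eq_zero] at hj
          rw [hcnt, hj]
          rw [dslBuildN_zero]
          have : (0 :: vs).map (dslF e) = 0 :: vs := dslMapF_id e (0 :: vs) (by
            simp only [List.mem_cons, not_or]
            exact ⟨he, hevs⟩)
          rw [this]
          rw [List.filter_cons]
          simp only [show ((0 : Int) != e) = true by simpa using Ne.symm he, if_true]
          congr 1
          symm
          rw [List.filter_eq_self]
          intro x hx
          have : x ≠ e := fun hxe => hevs (hxe ▸ hx)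
          simpa using this
        · -- at least one match: the leading literal 0 is consumed, p turns to zeros
          have hje : 1 ≤ p.count e := by omega
          have hple : p.count e ≤ p.length := List.count_le_length
          rw [hcnt, hcnt2, hmap]
          rw [show List.replicate (p.length + 1) 0 ++ s.map (dslF e)
              = 0 :: (List.replicate p.length 0 ++ s.map (dslF e)) by
            simp [List.replicate_succ]]
          rw [dslBuildN, if_pos ⟨rfl, by omega⟩]
          rw [dslBuildN_replicate (p.count e - 1) p.length (s.map (dslF e)) (by omega)]
          -- B side
          rw [List.filter_cons]
          simp only [show ((0 : Int) != e) = true by simpa using Ne.symm he, if_true]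
          conv_rhs => rw [← hsplit]
          rw [List.filter_append]
          rw [dslFilter_zeros e he p hpmem]
          rw [dslMapF_id e s hes]
          rw [List.filter_eq_self.mpr (by
            intro x hx
            have : x ≠ e := fun hxe => hes (hxe ▸ hx)
            simpa using this)]
          have hc0 : p.count 0 = p.length - p.count e := dslCount0_of_mem e he p hpmem
          rw [hc0]
          rw [show p.length - (p.count e - 1) = (p.length - p.count e) + 1 by omega]
          simp [List.replicate_succ]
      · -- head is not a literal zero
        have hnd' : e ∉ (vs.dropWhile (fun x => x != 0)).dropWhile
            (fun x => x == 0 || x == e) := by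
          rw [List.dropWhile_cons] at hnd
          simp only [show (v != 0) = true by simpa using hv0, if_true] at hnd
          exact hnd
        by_cases hve : v = e
        · subst hve
          have : (v :: vs).count v = vs.count v + 1 := by simp [List.count_cons]
          rw [this]
          simp only [List.map_cons, dslF, if_pos rfl]
          rw [dslBuildN, if_pos ⟨rfl, by omega⟩]
          simp only [Nat.add_sub_cancel]
          rw [ih hnd']
          rw [List.filter_cons]
          simp
        · have : (v :: vs).count e = vs.count e := by simp [List.count_cons, hve]
          rw [this]
          simp only [List.map_cons, dslF, if_neg hve]
          rw [dslBuildN, if_neg (by rintro ⟨h1, -⟩; exact hv0 h1)]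
          rw [ih hnd']
          rw [List.filter_cons]
          simp [hve]


-- the head of a dropWhile result falsifies the predicate
theorem dslDropWhile_head (P : Int → Bool) (l : List Int) (r : Int) (rest : List Int)
    (h : l.dropWhile P = r :: rest) : P r = false := by
  induction l with
  | nil => simp [List.dropWhile] at h
  | cons x xs ih =>
      rw [List.dropWhile_cons] at h
      by_cases hx : P x = true
      · rw [if_pos hx] at h
        exact ih h
      · rw [if_neg hx] at h
        cases h
        simpa using hx

theorem dslBuildN_cons_ne (n : Nat) (x : Int) (l : List Int) (hx : x ≠ 0) :
    dslBuildN n (x :: l) = x :: dslBuildN n l := by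
  rw [dslBuildN, if_neg (by rintro ⟨h1, -⟩; exact hx h1)]

-- a prefix whose zeros are all within budget is filtered out entirely
theorem dslBuildN_append (x rest : List Int) : ∀ n, x.count 0 ≤ n →
    dslBuildN n (x ++ rest)
      = x.filter (fun v => v != 0) ++ dslBuildN (n - x.count 0) rest := by
  induction x with
  | nil => intro n _; simp
  | cons v vs ih =>
      intro n hn
      by_cases hv : v = 0
      · subst hv
        have h1 : 1 ≤ n := by
          have : 0 < (0 :: vs).count 0 := by simp [List.count_cons]
          omega
        rw [List.cons_append, dslBuildN, if_pos ⟨rfl, by omega⟩]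
        rw [ih (n - 1) (by simp [List.count_cons] at hn ⊢; omega)]
        rw [List.filter_cons]
        simp only [bne_self_eq_false, Bool.false_eq_true, if_false]
        congr 2
        simp [List.count_cons]
        omega
      · rw [List.cons_append, dslBuildN_cons_ne n v _ hv]
        rw [ih n (by simp [List.count_cons, hv] at hn ⊢; omega)]
        rw [List.filter_cons]
        simp only [show (v != (0:Int)) = true by simpa using hv, if_true]
        congr 3
        simp [List.count_cons, hv]

theorem dslMapF_count0 (e : Int) (he : e ≠ 0) (u : List Int) (hu : ∀ x ∈ u, x ≠ 0) :
    (u.map (dslF e)).count 0 = u.count e := by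
  induction u with
  | nil => simp
  | cons v vs ih =>
      have hv : v ≠ 0 := hu v (by simp)
      have hvs : ∀ x ∈ vs, x ≠ 0 := fun x hx => hu x (by simp [hx])
      by_cases hve : v = e <;>
        simp [dslF, hve, List.count_cons, ih hvs, hv, he]

theorem dslMapF_filter (e : Int) (u : List Int) (hu : ∀ x ∈ u, x ≠ 0) :
    (u.map (dslF e)).filter (fun v => v != 0) = u.filter (fun x => x != e) := by
  induction u with
  | nil => rfl
  | cons v vs ih =>
      have hv : v ≠ 0 := hu v (by simp)
      have hvs : ∀ x ∈ vs, x ≠ 0 := fun x hx => hu x (by simp [hx])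
      by_cases hve : v = e <;>
        simp [dslF, hve, List.filter_cons, ih hvs, hv]

-- lists of the shape 0^a ++ r :: _ with r ≠ 0 determine a
theorem dslRepNe (r r' : Int) (hr : r ≠ 0) (hr' : r' ≠ 0) :
    ∀ (a b : Nat), a ≠ b → ∀ (X Y : List Int),
      List.replicate a (0:Int) ++ r :: X ≠ List.replicate b 0 ++ r' :: Y := by
  intro a
  induction a with
  | zero =>
      intro b hab X Y h
      cases b with
      | zero => exact absurd rfl hab
      | succ b =>
          rw [List.replicate_succ] at h
          simp only [List.replicate_zero, List.nil_append, List.cons_append,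
            List.cons.injEq] at h
          exact hr h.1
  | succ a ih =>
      intro b hab X Y h
      cases b with
      | zero =>
          rw [List.replicate_succ] at h
          simp only [List.replicate_zero, List.nil_append, List.cons_append,
            List.cons.injEq] at h
          exact hr' h.1.symm
      | succ b =>
          rw [List.replicate_succ, List.replicate_succ] at h
          simp only [List.cons_append, List.cons.injEq, true_and] at h
          exact ih b (by omega) X Y h

-- A on a nonempty list: mark pass then count-e iterations of remove(0)
theorem dslA_eq (e : Int) (t : List Int) :
    delete_self_loops (e :: t)
      = dslRemove0^[t.count e] (e :: t.map (dslF e)) := by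
  unfold delete_self_loops
  rw [PySem.List.pyGet?_zero_cons]
  simp only
  have hmark := dslMark e t [] 0
  simp only [List.nil_append, List.length_nil, Nat.cast_zero, add_zero, zero_add] at hmark
  have hmarkA : (PySem.List.pyRange 1 ((e :: t).length : Int) 1).foldl
      (fun (s : List Int × Int) i =>
        if PySem.List.pyGetD s.1 i 0 = e then (PySem.List.pySetD s.1 i 0, s.2 + 1) else s)
      (e :: t, 0)
      = (e :: t.map (dslF e), (t.count e : Int)) := by
    have : ((e :: t).length : Int) = 1 + (t.length : Int) := by simp; omega
    rw [this]
    simpa using hmark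
  rw [hmarkA]
  rw [dslFoldl_const]
  congr 1
  rw [PySem.List.length_pyRange_one]
  omega

theorem dslMapF_zero_id (t : List Int) : t.map (dslF 0) = t := by
  have : ∀ x ∈ t, dslF 0 x = x := by
    intro x _
    unfold dslF
    split <;> simp_all
  simpa using List.map_congr_left this

-- ===== VERDICT (by name: the statements are the Claim_ definitions above) =====
theorem delete_self_loops_spec : Claim_unchanged_delete_self_loops := by
  intro a _ hpre hnd
  obtain ⟨e, t, rfl⟩ : ∃ e t, a = e :: t := by
    cases a with
    | nil => exact absurd rfl hpre
    | cons e t => exact ⟨e, t, rfl⟩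
  rw [dslA_eq]
  rw [show delete_self_loops_alt (e :: t) = e :: t.filter (fun x => x != e) from rfl]
  by_cases he : e = 0
  · -- head 0, ¬D_: t = (all-zero prefix) ++ s with 0 ∉ s
    subst he
    have hnd2 : (0 : Int) ∉ t.dropWhile (fun x => x == 0) := by
      intro h
      exact hnd ⟨by simp, by simpa using h⟩
    have hsplit := List.takeWhile_append_dropWhile (p := fun x => x == 0) (l := t)
    set p := t.takeWhile (fun x => x == 0) with hp
    set s := t.dropWhile (fun x => x == 0) with hs
    have hpmem : ∀ x ∈ p, x = 0 ∨ x = (0:Int) := by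
      intro x hx
      have := List.mem_takeWhile_imp hx
      simpa using this
    have h0s : (0 : Int) ∉ s := hnd2
    rw [dslMapF_zero_id]
    have hiter : dslRemove0^[t.count 0] ((0:Int) :: t) = dslBuildN (t.count 0) (0 :: t) := by
      apply dslIter_eq_buildN
      simp [List.count_cons]
    rw [hiter]
    have hcnt : t.count 0 = p.length := by
      conv_lhs => rw [← hsplit]
      rw [dslCount_append_notmem 0 p s h0s]
      exact List.count_eq_length.mpr (by intro x hx; exact ((hpmem x hx).elim id id).symm)
    have hpz : p = List.replicate p.length 0 :=
      List.eq_replicate_iff.mpr ⟨rfl, fun x hx => (hpmem x hx).elim id id⟩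
    have hrep : (0:Int) :: t = List.replicate (p.length + 1) 0 ++ s := by
      conv_lhs => rw [← hsplit, hpz]
      simp [List.replicate_succ]
    rw [hcnt, hrep,
      dslBuildN_replicate p.length (p.length + 1) s (by omega)]
    have hfs : s.filter (fun x => x != (0:Int)) = s := by
      rw [List.filter_eq_self]
      intro x hx
      simp only [bne_iff_ne, ne_eq]
      intro hx0
      exact h0s (hx0 ▸ hx)
    have hfilter : t.filter (fun x => x != (0:Int)) = s := by
      conv_lhs => rw [← hsplit, hpz]
      rw [List.filter_append, hfs]
      simp
    rw [hfilter]
    simp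
  · rw [dslIter_cons_ne _ e _ he]
    rw [dslIter_eq_buildN _ _ (dslCountZeroMap e t)]
    have hnd2 : e ∉ (t.dropWhile (fun x => x != 0)).dropWhile
        (fun x => x == 0 || x == e) := by
      intro h
      refine hnd ⟨by simp, ?_⟩
      simp only [List.headI, List.drop_one, List.tail_cons]
      rw [if_neg he]
      exact h
    rw [dslBuild_eq_filter e he t hnd2]

theorem delete_self_loops_changed : Claim_changed_delete_self_loops := by
  unfold Claim_changed_delete_self_loops; decide

theorem delete_self_loops_tight : Claim_exact_delete_self_loops := by
  intro a _ hpre hd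
  obtain ⟨e, t, rfl⟩ : ∃ e t, a = e :: t := by
    cases a with
    | nil => exact absurd rfl hpre
    | cons e t => exact ⟨e, t, rfl⟩
  rw [dslA_eq]
  rw [show delete_self_loops_alt (e :: t) = e :: t.filter (fun x => x != e) from rfl]
  obtain ⟨-, hD⟩ := hd
  by_cases he : e = 0
  · -- head 0: D says a 0 occurs after the leading zeros, i.e. after some nonzero
    subst he
    have hD2 : (0 : Int) ∈ t.dropWhile (fun x => x == 0) := by
      simpa using hD
    rw [dslMapF_zero_id]
    obtain ⟨v, s', hvs⟩ : ∃ v s', t.dropWhile (fun x => x == 0) = v :: s' := by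
      cases hcase : t.dropWhile (fun x => x == 0) with
      | nil => rw [hcase] at hD2; simp at hD2
      | cons v s' => exact ⟨v, s', rfl⟩
    rw [hvs] at hD2
    set p := t.takeWhile (fun x => x == 0) with hp
    have hsplit : p ++ v :: s' = t := by
      rw [hp, ← hvs]
      exact List.takeWhile_append_dropWhile
    have hv : v ≠ 0 := by
      have := dslDropWhile_head _ t v s' hvs
      simpa using this
    have h0s' : (0 : Int) ∈ s' := by
      rcases List.mem_cons.mp hD2 with h | h
      · exact absurd h.symm hv
      · exact h
    have hc : 1 ≤ s'.count 0 := List.count_pos_iff.mpr h0s'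
    have hpz : p = List.replicate p.length 0 :=
      List.eq_replicate_iff.mpr ⟨rfl, fun x hx => by
        simpa using List.mem_takeWhile_imp hx⟩
    have hiter : dslRemove0^[t.count 0] ((0:Int) :: t) = dslBuildN (t.count 0) (0 :: t) := by
      apply dslIter_eq_buildN
      simp [List.count_cons]
    rw [hiter]
    have hcnt : t.count 0 = p.length + s'.count 0 := by
      conv_lhs => rw [← hsplit]
      rw [List.count_append]
      congr 1
      · rw [hpz]; simp
      · simp [List.count_cons, hv]
    have hrep : (0:Int) :: t = List.replicate (p.length + 1) 0 ++ v :: s' := by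
      conv_lhs => rw [← hsplit, hpz]
      simp [List.replicate_succ]
    rw [hcnt, hrep]
    rw [dslBuildN_append (List.replicate (p.length + 1) 0) (v :: s')
      (p.length + s'.count 0) (by simp; omega)]
    rw [dslBuildN_cons_ne _ v _ hv]
    simp only [List.filter_replicate, bne_self_eq_false, Bool.false_eq_true, if_false,
      List.nil_append]
    intro h
    rw [List.cons.injEq] at h
    exact hv h.1
  · -- head e ≠ 0: D gives t = u ++ 0 :: (q' ++ r :: s3), u nonzero, q' ⊆ {0,e},
    -- r ∉ {0,e}, e ∈ s3; the budget overshoot shifts the zero block before r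
    have hD2 : e ∈ (t.dropWhile (fun x => x != 0)).dropWhile
        (fun x => x == 0 || x == e) := by
      have := hD
      rw [if_neg (by simpa using he)] at this
      simpa using this
    obtain ⟨z, w, hzw⟩ : ∃ z w, t.dropWhile (fun x => x != 0) = z :: w := by
      cases hcase : t.dropWhile (fun x => x != 0) with
      | nil => rw [hcase] at hD2; simp at hD2
      | cons z w => exact ⟨z, w, rfl⟩
    have hz : z = 0 := by
      have := dslDropWhile_head _ t z w hzw
      simpa using this
    subst hz
    rw [hzw, List.dropWhile_cons] at hD2
    simp only [BEq.rfl, Bool.true_or, if_true] at hD2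
    set u := t.takeWhile (fun x => x != 0) with hu
    have hsplit1 : u ++ 0 :: w = t := by
      rw [hu, ← hzw]
      exact List.takeWhile_append_dropWhile
    have hunz : ∀ x ∈ u, x ≠ 0 := fun x hx => by
      simpa using List.mem_takeWhile_imp hx
    obtain ⟨r, s3, hrs⟩ : ∃ r s3, w.dropWhile (fun x => x == 0 || x == e) = r :: s3 := by
      cases hcase : w.dropWhile (fun x => x == 0 || x == e) with
      | nil => rw [hcase] at hD2; simp at hD2
      | cons r s3 => exact ⟨r, s3, rfl⟩
    rw [hrs] at hD2
    set q' := w.takeWhile (fun x => x == 0 || x == e) with hq'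
    have hsplit2 : q' ++ r :: s3 = w := by
      rw [hq', ← hrs]
      exact List.takeWhile_append_dropWhile
    have hq'mem : ∀ x ∈ q', x = 0 ∨ x = e := fun x hx => by
      simpa using List.mem_takeWhile_imp hx
    have hr : r ≠ 0 ∧ r ≠ e := by
      have := dslDropWhile_head _ w r s3 hrs
      constructor <;> intro hx <;> subst hx <;> simp at this
    have hes3 : e ∈ s3 := by
      rcases List.mem_cons.mp hD2 with h | h
      · exact absurd h.symm hr.2
      · exact h
    have hcs3 : 1 ≤ s3.count e := List.count_pos_iff.mpr hes3
    -- the shape of t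
    have ht : t = u ++ 0 :: (q' ++ r :: s3) := by
      rw [← hsplit1, hsplit2]
    -- the A side
    rw [dslIter_cons_ne _ e _ he,
      dslIter_eq_buildN _ _ (dslCountZeroMap e t)]
    intro h
    rw [List.cons.injEq] at h
    replace h := h.2
    -- compute both tails over the decomposition
    rw [ht] at h
    have hfr : dslF e r = r := by simp [dslF, hr.2]
    have hf0 : dslF e 0 = 0 := by simp [dslF, Ne.symm he]
    have hmapt : (u ++ 0 :: (q' ++ r :: s3)).map (dslF e)
        = u.map (dslF e) ++ (List.replicate (q'.length + 1) 0
            ++ r :: s3.map (dslF e)) := by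
      simp [List.map_append, dslMapF_zeros e q' hq'mem, hf0, hfr,
        List.replicate_succ]
    have hcnt : (u ++ 0 :: (q' ++ r :: s3)).count e
        = u.count e + (q'.count e + s3.count e) := by
      simp [List.count_append, List.count_cons, Ne.symm he, hr.2]
      try omega
    rw [hmapt, hcnt] at h
    rw [dslBuildN_append (u.map (dslF e)) _ _ (by
      rw [dslMapF_count0 e he u hunz]; omega)] at h
    rw [dslMapF_count0 e he u hunz] at h
    rw [dslMapF_filter e u hunz] at h
    rw [show u.count e + (q'.count e + s3.count e) - u.count e
        = q'.count e + s3.count e by omega] at h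
    -- B tail
    rw [List.filter_append, List.filter_cons] at h
    simp only [show ((0:Int) != e) = true by simpa using Ne.symm he, if_true] at h
    rw [List.filter_append, List.filter_cons] at h
    simp only [show (r != e) = true by simpa using hr.2, if_true] at h
    rw [dslFilter_zeros e he q' hq'mem] at h
    replace h := List.append_cancel_left h
    rw [show (0:Int) :: (List.replicate (q'.count 0) 0 ++ r :: s3.filter (fun x => x != e))
        = List.replicate (q'.count 0 + 1) 0 ++ r :: s3.filter (fun x => x != e) by
      simp [List.replicate_succ]] at h
    have hcq'le : q'.count e ≤ q'.length := List.count_le_length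
    have hc0q' : q'.count 0 = q'.length - q'.count e := dslCount0_of_mem e he q' hq'mem
    by_cases hbudget : q'.count e + s3.count e ≤ q'.length + 1
    · rw [dslBuildN_replicate _ _ _ (by omega)] at h
      exact dslRepNe r r hr.1 hr.1
        (q'.length + 1 - (q'.count e + s3.count e)) (q'.count 0 + 1)
        (by omega) _ _ h
    · rw [dslBuildN_append (List.replicate (q'.length + 1) 0) _ _ (by simp; omega)] at h
      simp only [List.filter_replicate, bne_self_eq_false, Bool.false_eq_true, if_false,
        List.nil_append] at h
      rw [dslBuildN_cons_ne _ r _ hr.1] at h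
      exact dslRepNe r r hr.1 hr.1 0 (q'.count 0 + 1) (by omega) _ _ (by simpa using h)
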